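-- pv_equiv track=rewrite | github.com/FORTH-ICS-INSPIRE/artemis | utils/artemis_utils/__init__.py | __remove_prepending
-- ===== SOURCE A (Python) =====
-- from typing import List
-- from typing import Tuple
--
-- def __remove_prepending(seq: List[int]) -> Tuple[List[int], bool]:
--     """
--     Method to remove prepending ASs from AS path.
--     """
--     last_add = None
--     new_seq = []
--     for x in seq:
--         if last_add != x:
--             last_add = x
--             new_seq.append(x)
--
--     is_loopy = False
--     if len(set(seq)) != len(new_seq):
--         is_loopy = True
--     return new_seq, is_loopy
-- ===== SOURCE B (Python) =====
-- from typing import List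
-- from typing import Tuple
--
-- def __remove_prepending(seq: List[int]) -> Tuple[List[int], bool]:
--     """
--     Collapse consecutive duplicates in one pass, detecting a loop
--     incrementally via a 'seen' set (no post-loop set/length comparison).
--     """
--     last_add = None
--     new_seq = []
--     seen = set()
--     is_loopy = False
--     for x in seq:
--         if last_add != x:
--             if x in seen:
--                 is_loopy = True
--             else:
--                 seen.add(x)
--             new_seq.append(x)
--             last_add = x
--     return new_seq, is_loopy
-- ===== Notes on version B (the rewrite author's own statement) =====
-- stated objective: alternative
-- what changed: B detects the loop incrementally inside the single collapsing pass via a running 'seen' set (flagging when a new run starts with an already-seen AS), removing A's post-loop len(set(seq)) vs len(new_seq) comparison and the extra set construction over the whole sequence.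
import Mathlib
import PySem

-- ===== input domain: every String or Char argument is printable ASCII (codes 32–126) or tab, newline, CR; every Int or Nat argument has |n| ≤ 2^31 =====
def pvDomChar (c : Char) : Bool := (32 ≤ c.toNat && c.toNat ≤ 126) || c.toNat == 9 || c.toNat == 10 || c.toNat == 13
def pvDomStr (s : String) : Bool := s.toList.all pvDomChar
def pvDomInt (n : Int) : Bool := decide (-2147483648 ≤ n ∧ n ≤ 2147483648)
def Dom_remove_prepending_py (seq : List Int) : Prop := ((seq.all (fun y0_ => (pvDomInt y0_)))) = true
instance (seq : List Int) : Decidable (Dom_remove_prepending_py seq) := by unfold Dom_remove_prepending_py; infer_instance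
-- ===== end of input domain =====

-- B collapses consecutive duplicates and detects the loop incrementally with a running
-- 'seen' set inside the single pass, instead of A's post-loop len(set(seq)) comparison.

-- ===== PORT A =====
-- the 'for x in seq' loop of A: state (last_add, new_seq)
def pvA_loop : List Int → Option Int → List Int → List Int
  | [], _, acc => acc
  | x :: xs, last, acc =>
    if last ≠ some x then pvA_loop xs (some x) (acc ++ [x])
    else pvA_loop xs last acc

def remove_prepending_py (seq : List Int) : List Int × Bool :=
  let new_seq := pvA_loop seq none []
  let is_loopy : Bool := decide ((PySem.Set.ofList seq).length ≠ new_seq.length)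
  (new_seq, is_loopy)

-- ===== PORT B =====
-- the single pass of B: state (last_add, seen, new_seq, is_loopy)
def pvB_loop : List Int → Option Int → PySem.Set Int → List Int → Bool → List Int × Bool
  | [], _, _, acc, loopy => (acc, loopy)
  | x :: xs, last, seen, acc, loopy =>
    if last ≠ some x then
      if PySem.Set.contains seen x then
        pvB_loop xs (some x) seen (acc ++ [x]) true
      else
        pvB_loop xs (some x) (PySem.Set.add seen x) (acc ++ [x]) loopy
    else
      pvB_loop xs last seen acc loopy

def remove_prepending_py_alt (seq : List Int) : List Int × Bool :=
  pvB_loop seq none PySem.Set.empty [] false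

-- ===== PRECONDITION & SPEC =====
def Spec_remove_prepending_py (seq : List Int) (out : List Int × Bool) : Prop := out = remove_prepending_py_alt seq
instance (seq : List Int) (out : List Int × Bool) : Decidable (Spec_remove_prepending_py seq out) := by unfold Spec_remove_prepending_py; infer_instance

-- ===== CLAIM (what is proved, stated in full; the proofs are below) =====
def Claim_equal_remove_prepending_py : Prop := ∀ (seq : List Int), Dom_remove_prepending_py seq → Spec_remove_prepending_py seq (remove_prepending_py seq)

-- ===== LEMMAS AND PROOFS =====

-- B's list component is exactly A's loop result (seen/loopy do not influence it)
theorem pvB_fst (xs : List Int) : ∀ (last : Option Int) (seen : PySem.Set Int)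
    (acc : List Int) (loopy : Bool),
    (pvB_loop xs last seen acc loopy).1 = pvA_loop xs last acc := by
  induction xs with
  | nil => intro last seen acc loopy; rfl
  | cons x xs ih =>
    intro last seen acc loopy
    simp only [pvB_loop, pvA_loop]
    split
    · split <;> exact ih _ _ _ _
    · exact ih _ _ _ _

-- membership in A's loop result, given that the current last element is already in acc
theorem pvA_mem (xs : List Int) : ∀ (last : Option Int) (acc : List Int),
    (∀ v, last = some v → v ∈ acc) →
    ∀ y, y ∈ pvA_loop xs last acc ↔ y ∈ acc ∨ y ∈ xs := by
  induction xs with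
  | nil => intro last acc _ y; simp [pvA_loop]
  | cons x xs ih =>
    intro last acc hlast y
    simp only [pvA_loop]
    split
    · rw [ih (some x) (acc ++ [x]) (by simp)]
      simp only [List.mem_append, List.mem_cons]
      tauto
    · rename_i h
      rw [ih last acc hlast]
      have hx : x ∈ acc := hlast x (by simpa using h)
      simp only [List.mem_cons]
      constructor
      · tauto
      · rintro (h1 | rfl | h1)
        · exact Or.inl h1
        · exact Or.inl hx
        · exact Or.inr h1

-- B's boolean component tracks "new_seq has a duplicate", given the loop invariant
theorem pvB_snd (xs : List Int) : ∀ (last : Option Int) (seen : PySem.Set Int)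
    (acc : List Int) (loopy : Bool),
    (∀ y, y ∈ seen ↔ y ∈ acc) →
    (loopy = !decide acc.Nodup) →
    (pvB_loop xs last seen acc loopy).2 = !decide (pvA_loop xs last acc).Nodup := by
  induction xs with
  | nil => intro last seen acc loopy hseen hloopy; simpa [pvB_loop, pvA_loop]
  | cons x xs ih =>
    intro last seen acc loopy hseen hloopy
    simp only [pvB_loop, pvA_loop]
    split
    · by_cases hx : x ∈ acc
      · have hc : PySem.Set.contains seen x = true := by
          rw [PySem.Set.contains_iff, hseen]; exact hx
        rw [if_pos hc]
        refine ih _ _ _ _ (fun y => by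
          rw [hseen y]
          simp only [List.mem_append, List.mem_singleton]
          constructor
          · exact Or.inl
          · rintro (h | rfl)
            · exact h
            · exact hx) ?_
        have : ¬ (acc ++ [x]).Nodup := by
          simp [List.nodup_append]
          intro _; exact hx
        simp [this]
      · have hc : ¬ PySem.Set.contains seen x = true := by
          rw [PySem.Set.contains_iff, hseen]; exact hx
        rw [if_neg hc]
        refine ih _ _ _ _ (fun y => by
          rw [PySem.Set.mem_add]
          simp [hseen y]) ?_
        have : (acc ++ [x]).Nodup ↔ acc.Nodup := by
          rw [List.Perm.nodup_iff List.perm_append_comm]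
          simp [List.nodup_cons, hx]
        rw [hloopy]
        by_cases hnd : acc.Nodup <;> simp [hnd, this]
    · exact ih _ _ _ _ hseen hloopy

-- A's post-loop comparison computes exactly "new_seq has a duplicate"
theorem pvA_bool (seq : List Int) :
    decide ((PySem.Set.ofList seq).length ≠ (pvA_loop seq none []).length)
      = !decide (pvA_loop seq none []).Nodup := by
  set new_seq := pvA_loop seq none [] with hns
  have hmem : ∀ y, y ∈ new_seq ↔ y ∈ seq := by
    intro y
    rw [hns, pvA_mem seq none [] (by simp)]
    simp
  have hperm : (PySem.Set.ofList seq).Perm new_seq.dedup := by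
    rw [List.perm_ext_iff_of_nodup (PySem.Set.nodup_ofList seq) (List.nodup_dedup _)]
    intro y
    rw [PySem.Set.mem_ofList, List.mem_dedup, hmem]
  have hlen : (PySem.Set.ofList seq).length = new_seq.dedup.length := hperm.length_eq
  by_cases hnd : new_seq.Nodup
  · have : new_seq.dedup = new_seq := List.dedup_eq_self.mpr hnd
    simp [hlen, this, hnd]
  · have hne : new_seq.dedup.length ≠ new_seq.length := by
      intro heq
      exact hnd (List.dedup_eq_self.mp ((new_seq.dedup_sublist).eq_of_length heq))
    simp [hlen, hne, hnd]

-- ===== VERDICT (by name: the statement is the Claim_ definition above) =====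
theorem remove_prepending_py_spec : Claim_equal_remove_prepending_py := by
  intro seq _
  unfold Spec_remove_prepending_py remove_prepending_py remove_prepending_py_alt
  have h1 := pvB_fst seq none PySem.Set.empty [] false
  have h2 := pvB_snd seq none PySem.Set.empty [] false (by simp [PySem.Set.empty]) (by simp)
  have h3 := pvA_bool seq
  refine Prod.ext ?_ ?_
  · exact h1.symm
  · exact h3.trans h2.symm
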